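-- pv_equiv track=rewrite | github.com/ilastik/ilastik | lazyflow/operators/opLazyConnectedComponents.py | _orderPair
-- ===== SOURCE A (Python) =====
-- from builtins import zip
--
-- def _orderPair(tupA, tupB):
--     for a, b in zip(tupA, tupB):
--         if a < b:
--             return tupA, tupB
--         if a > b:
--             return tupB, tupA
--     raise ValueError("tupA={} and tupB={} are the same".format(tupA, tupB))
--     return tupA, tupB
-- ===== SOURCE B (Python) =====
-- def _orderPair(tupA, tupB):
--     n = min(len(tupA), len(tupB))
--     a, b = tupA[:n], tupB[:n]
--     if a < b:
--         return tupA, tupB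
--     if a > b:
--         return tupB, tupA
--     raise ValueError("tupA={} and tupB={} are the same".format(tupA, tupB))
-- ===== Notes on version B (the rewrite author's own statement) =====
-- stated objective: idiomatic
-- what changed: Replaced A's explicit element-by-element zip loop with one library-level lexicographic comparison of the two prefixes truncated to the common length, returning the original full tuples.
import Mathlib
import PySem

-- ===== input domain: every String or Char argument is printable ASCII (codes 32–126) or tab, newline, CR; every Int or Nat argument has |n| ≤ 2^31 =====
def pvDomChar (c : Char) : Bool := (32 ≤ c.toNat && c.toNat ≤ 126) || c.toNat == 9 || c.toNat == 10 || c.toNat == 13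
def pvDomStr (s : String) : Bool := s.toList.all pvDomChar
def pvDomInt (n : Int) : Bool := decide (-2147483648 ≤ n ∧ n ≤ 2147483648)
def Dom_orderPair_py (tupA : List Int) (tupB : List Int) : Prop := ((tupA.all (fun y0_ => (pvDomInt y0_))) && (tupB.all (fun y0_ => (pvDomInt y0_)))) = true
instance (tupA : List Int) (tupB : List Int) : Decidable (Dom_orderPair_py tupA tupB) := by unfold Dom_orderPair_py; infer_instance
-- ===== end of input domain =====

-- B replaces A's explicit element-by-element loop by one library lexicographic comparison of the
-- two length-truncated prefixes (objective: idiomatic); both raise ValueError on equal prefixes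
-- (excluded by Pre_).

-- ===== PORT A =====
-- A: for a, b in zip(tupA, tupB): if a < b: return (tupA,tupB); if a > b: return (tupB,tupA); raise ValueError
-- the exhausted-loop case is Python's raise; Pre_ excludes it (the returned value there is never claimed)
def orderGo (tupA tupB : List Int) : List (Int × Int) → List Int × List Int
  | [] => (tupA, tupB)
  | (a, b) :: rest =>
      if a < b then (tupA, tupB)
      else if a > b then (tupB, tupA)
      else orderGo tupA tupB rest

def orderPair_py (tupA : List Int) (tupB : List Int) : List Int × List Int :=
  orderGo tupA tupB (tupA.zip tupB)

-- ===== PORT B =====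
-- B: n = min(len, len); a, b = tupA[:n], tupB[:n]; if a < b … elif a > b … else raise.
-- tupA[:n] with 0 ≤ n is exactly List.take n; tuple '<' is List.lex with (· < ·).
-- the final else is Python's raise; Pre_ excludes it
def orderPair_py_alt (tupA : List Int) (tupB : List Int) : List Int × List Int :=
  let n := min tupA.length tupB.length
  let a := tupA.take n
  let b := tupB.take n
  if a.lex b (· < ·) then (tupA, tupB)
  else if b.lex a (· < ·) then (tupB, tupA)
  else (tupA, tupB)

-- ===== PRECONDITION & SPEC =====
-- Pre_ excludes exactly the inputs whose prefixes of the common length are equal: there A (and B)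
-- raise ValueError instead of returning a value.
def Pre_orderPair_py (tupA : List Int) (tupB : List Int) : Prop :=
  tupA.take (min tupA.length tupB.length) ≠ tupB.take (min tupA.length tupB.length)
instance (tupA : List Int) (tupB : List Int) : Decidable (Pre_orderPair_py tupA tupB) := by
  unfold Pre_orderPair_py; infer_instance

def pvWitness_orderPair_py : List Int × List Int := ([1, 2], [1, 3, 4])

def Spec_orderPair_py (tupA : List Int) (tupB : List Int) (out : List Int × List Int) : Prop := out = orderPair_py_alt tupA tupB
instance (tupA : List Int) (tupB : List Int) (out : List Int × List Int) : Decidable (Spec_orderPair_py tupA tupB out) := by unfold Spec_orderPair_py; infer_instance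

-- ===== CLAIM (what is proved, stated in full; the proofs are below) =====
def Claim_equal_orderPair_py : Prop := ∀ (tupA : List Int) (tupB : List Int), Dom_orderPair_py tupA tupB → Pre_orderPair_py tupA tupB → Spec_orderPair_py tupA tupB (orderPair_py tupA tupB)

-- ===== LEMMAS AND PROOFS =====

-- A's loop over the zip of two equal-length distinct lists decides their lexicographic order
theorem orderGo_eq_lex (as : List Int) : ∀ (bs X Y : List Int),
    as.length = bs.length → as ≠ bs →
    orderGo X Y (as.zip bs) = if as.lex bs (· < ·) then (X, Y) else (Y, X) := by
  induction as with
  | nil =>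
      intro bs X Y hlen hne
      cases bs with
      | nil => exact absurd rfl hne
      | cons b bs => simp at hlen
  | cons a as ih =>
      intro bs X Y hlen hne
      cases bs with
      | nil => simp at hlen
      | cons b bs =>
          simp only [List.zip_cons_cons, orderGo, List.lex]
          by_cases hab : a < b
          · simp [hab]
          · by_cases hba : a > b
            · have hne2 : ¬ (a == b) = true := by simp; omega
              simp [hab, hba, hne2]
            · have heq : a = b := le_antisymm (not_lt.mp hba) (not_lt.mp hab)
              subst heq
              have hne' : as ≠ bs := fun h => hne (by rw [h])
              have hlen' : as.length = bs.length := by simpa using hlen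
              rw [if_neg hab, if_neg hba, ih bs X Y hlen' hne']
              simp only [lt_irrefl, decide_false, Bool.false_or, BEq.rfl, Bool.true_and]

-- on equal-length distinct lists, one of the two lexicographic comparisons holds
theorem lex_total_of_ne (as : List Int) : ∀ bs : List Int,
    as.length = bs.length → as ≠ bs →
    as.lex bs (· < ·) = false → bs.lex as (· < ·) = true := by
  induction as with
  | nil =>
      intro bs hlen hne
      cases bs with
      | nil => exact absurd rfl hne
      | cons b bs => simp at hlen
  | cons a as ih =>
      intro bs hlen hne hf
      cases bs with
      | nil => simp at hlen
      | cons b bs =>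
          simp only [List.lex] at hf ⊢
          by_cases hab : a < b
          · simp [hab] at hf
          · by_cases hba : b < a
            · simp [hba]
            · have heq : a = b := le_antisymm (not_lt.mp hba) (not_lt.mp hab)
              subst heq
              have hne' : as ≠ bs := fun h => hne (by rw [h])
              have hlen' : as.length = bs.length := by simpa using hlen
              simp only [lt_irrefl, decide_false, Bool.false_or, BEq.rfl,
                Bool.true_and] at hf ⊢
              exact ih bs hlen' hne' hf

-- ===== VERDICT (by name: the statement is the Claim_ definition above) =====
theorem orderPair_py_spec : Claim_equal_orderPair_py := by
  intro tupA tupB _ hpre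
  unfold Spec_orderPair_py orderPair_py
  set n := min tupA.length tupB.length with hn
  set a := tupA.take n with ha
  set b := tupB.take n with hb
  have hlen : a.length = b.length := by
    simp [ha, hb, hn]
  have hne : a ≠ b := hpre
  have halt : orderPair_py_alt tupA tupB =
      (if a.lex b (· < ·) then (tupA, tupB)
       else if b.lex a (· < ·) then (tupB, tupA) else (tupA, tupB)) := rfl
  rw [halt, List.zip_eq_zip_take_min, ← hn, ← ha, ← hb,
      orderGo_eq_lex a b tupA tupB hlen hne]
  by_cases h : a.lex b (· < ·) = true
  · rw [if_pos h, if_pos h]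
  · have h' : a.lex b (· < ·) = false := by simpa using h
    rw [if_neg h, if_neg h, if_pos (lex_total_of_ne a b hlen hne h')]
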